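-- pv_equiv track=rewrite | github.com/pkanumula/Leetcode | 1691-minimum-number-of-days-to-disconnect-island/1691-minimum-number-of-days-to-disconnect-island.py | isDisconnected
-- ===== SOURCE A (Python) =====
-- def isDisconnected(grid):
--     m, n = len(grid), len(grid[0])
--     visited = [[False] * n for _ in range(m)]
--     land_cells = sum(cell for row in grid for cell in row)
--
--     def dfs(x, y):
--         if x < 0 or x >= m or y < 0 or y >= n or grid[x][y] == 0 or visited[x][y]:
--             return 0
--         visited[x][y] = True
--         return 1 + dfs(x + 1, y) + dfs(x - 1, y) + dfs(x, y + 1) + dfs(x, y - 1)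
--
--     for i in range(m):
--         for j in range(n):
--             if grid[i][j] == 1:
--                 connected_land = dfs(i, j)
--                 return connected_land != land_cells
--     return True
-- ===== SOURCE B (Python) =====
-- def isDisconnected(grid):
--     m, n = len(grid), len(grid[0])
--     total = sum(map(sum, grid))
--     start = next(((i, j) for i in range(m) for j in range(n) if grid[i][j] == 1), None)
--     if start is None:
--         return True
--     seen = [[False] * n for _ in range(m)]
--     count = 0
--     stack = [start]
--     while stack:
--         x, y = stack.pop()
--         if x < 0 or x >= m or y < 0 or y >= n or grid[x][y] == 0 or seen[x][y]:
--             continue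
--         seen[x][y] = True
--         count += 1
--         stack += [(x, y - 1), (x, y + 1), (x - 1, y), (x + 1, y)]
--     return count != total
-- ===== Notes on version B (the rewrite author's own statement) =====
-- stated objective: alternative
-- what changed: Replaces the recursive DFS (closure mutating visited, early return inside the double scan loop) with an iterative explicit-stack flood fill driven by a worklist, with the start cell found once up front.
-- outside the precondition, e.g. on isDisconnected([[1, 0], [0]]): A returns False, B returns False
import Mathlib
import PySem

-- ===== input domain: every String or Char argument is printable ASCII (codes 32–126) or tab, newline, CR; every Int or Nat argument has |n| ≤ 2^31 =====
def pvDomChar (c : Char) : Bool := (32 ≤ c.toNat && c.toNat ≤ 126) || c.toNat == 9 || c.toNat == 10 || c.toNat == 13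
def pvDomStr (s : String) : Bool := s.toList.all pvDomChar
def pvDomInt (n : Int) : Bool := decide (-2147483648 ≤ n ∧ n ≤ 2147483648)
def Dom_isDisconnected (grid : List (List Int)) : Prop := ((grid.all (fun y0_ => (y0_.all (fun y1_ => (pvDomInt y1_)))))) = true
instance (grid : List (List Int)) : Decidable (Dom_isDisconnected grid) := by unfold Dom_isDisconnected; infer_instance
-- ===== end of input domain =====

-- B replaces A's recursive DFS with an iterative explicit-stack flood fill (objective: alternative).

-- ===== PORT A =====
-- shared indexing helpers (both ports index grid/visited only after the 0 ≤ x < m / 0 ≤ y < n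
-- range guards, where getD is exact for Python's grid[x][y] / visited[x][y])
def gcell (g : List (List Int)) (x y : Int) : Int := (g.getD x.toNat []).getD y.toNat 0

def vget (v : List (List Bool)) (x y : Int) : Bool := (v.getD x.toNat []).getD y.toNat false

def vset (v : List (List Bool)) (x y : Int) : List (List Bool) :=
  v.set x.toNat ((v.getD x.toNat []).set y.toNat true)

-- the row-major index pairs of the double loop 'for i in range(m): for j in range(n)'
def pairs (m n : Nat) : List (Nat × Nat) :=
  (List.range m).flatMap (fun i => (List.range n).map (fun j => (i, j)))

-- A's dfs; the fuel only makes the recursion total and is never exhausted at the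
-- call site (fuel = m*n+1 > number of unvisited cells, see the invariant lemmas below)
def dfsA (g : List (List Int)) (m n : Int) :
    Nat → List (List Bool) → Int → Int → Int × List (List Bool)
  | 0, vis, _, _ => (0, vis)
  | fuel+1, vis, x, y =>
    if x < 0 ∨ m ≤ x ∨ y < 0 ∨ n ≤ y ∨ gcell g x y = 0 ∨ vget vis x y then (0, vis)
    else
      let vis1 := vset vis x y
      let r1 := dfsA g m n fuel vis1 (x+1) y
      let r2 := dfsA g m n fuel r1.2 (x-1) y
      let r3 := dfsA g m n fuel r2.2 x (y+1)
      let r4 := dfsA g m n fuel r3.2 x (y-1)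
      (1 + r1.1 + r2.1 + r3.1 + r4.1, r4.2)

-- A's double scan loop: the first cell equal to 1 starts the dfs and returns immediately
def scanA (g : List (List Int)) (m n : Nat) (land : Int) (vis : List (List Bool)) :
    List (Nat × Nat) → Bool
  | [] => true
  | (i, j) :: rest =>
    if gcell g (i : Int) (j : Int) = 1 then
      decide ((dfsA g (m : Int) (n : Int) (m*n+1) vis (i : Int) (j : Int)).1 ≠ land)
    else scanA g m n land vis rest

def isDisconnected (grid : List (List Int)) : Bool :=
  let m := grid.length
  let n := (grid.headD []).length
  let vis0 := List.replicate m (List.replicate n false)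
  let land := (grid.flatMap (fun row => row)).sum
  scanA grid m n land vis0 (pairs m n)

-- ===== PORT B =====
-- Source B's next(((i,j) for i in range(m) for j in range(n) if grid[i][j] == 1), None)
def firstLand (g : List (List Int)) : List (Nat × Nat) → Option (Nat × Nat)
  | [] => none
  | (i, j) :: rest => if gcell g (i : Int) (j : Int) = 1 then some (i, j) else firstLand g rest

-- Source B's while loop over the explicit stack (head of the list = top of the Python list);
-- the fuel only makes the loop total and is never exhausted at the call site
def loopB (g : List (List Int)) (m n : Int) :
    Nat → Int → List (List Bool) → List (Int × Int) → Int
  | _, cnt, _, [] => cnt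
  | 0, cnt, _, _ :: _ => cnt
  | f+1, cnt, vis, (x, y) :: rest =>
    if x < 0 ∨ m ≤ x ∨ y < 0 ∨ n ≤ y ∨ gcell g x y = 0 ∨ vget vis x y then
      loopB g m n f cnt vis rest
    else
      loopB g m n f (cnt+1) (vset vis x y) ((x+1, y) :: (x-1, y) :: (x, y+1) :: (x, y-1) :: rest)

def isDisconnected_alt (grid : List (List Int)) : Bool :=
  let m := grid.length
  let n := (grid.headD []).length
  let total := (grid.map (fun row => row.sum)).sum
  match firstLand grid (pairs m n) with
  | none => true
  | some (i, j) =>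
    let cnt := loopB grid (m : Int) (n : Int) (4*(m*n)+1) 0
      (List.replicate m (List.replicate n false)) [((i : Int), (j : Int))]
    decide (cnt ≠ total)

-- ===== PRECONDITION & SPEC =====
-- Pre_ excludes the empty grid (A's len(grid[0]) raises IndexError) and grids with a row
-- shorter than the first row: there A raises IndexError whenever the scan or the flood fill
-- reaches a missing cell, and where it happens to return, which cells exist at all is an
-- accident of the row lengths. Rows longer than the first are fine (A never indexes past n).
def Pre_isDisconnected (grid : List (List Int)) : Prop :=
  grid ≠ [] ∧ ∀ row ∈ grid, (grid.headD []).length ≤ row.length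
instance (grid : List (List Int)) : Decidable (Pre_isDisconnected grid) := by
  unfold Pre_isDisconnected; infer_instance

def pvWitness_isDisconnected : List (List Int) := [[1, 0], [0, 1]]

def Spec_isDisconnected (grid : List (List Int)) (out : Bool) : Prop := out = isDisconnected_alt grid
instance (grid : List (List Int)) (out : Bool) : Decidable (Spec_isDisconnected grid out) := by
  unfold Spec_isDisconnected; infer_instance

-- ===== CLAIM (what is proved, stated in full; the proofs are below) =====
def Claim_equal_isDisconnected : Prop := ∀ (grid : List (List Int)), Dom_isDisconnected grid → Pre_isDisconnected grid → Spec_isDisconnected grid (isDisconnected grid)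

-- ===== LEMMAS AND PROOFS =====

-- shape of a visited matrix, and its number of still-unvisited cells
def ShapeOk (m n : Nat) (v : List (List Bool)) : Prop :=
  v.length = m ∧ ∀ r ∈ v, r.length = n

def unvis (v : List (List Bool)) : Nat := (v.map (fun r => r.count false)).sum

lemma vset_shape {m n : Nat} {v : List (List Bool)} (h : ShapeOk m n v) (x y : Int) :
    ShapeOk m n (vset v x y) := by
  obtain ⟨h1, h2⟩ := h
  refine ⟨by simpa [vset] using h1, ?_⟩
  unfold vset
  by_cases hx : x.toNat < v.length
  · intro r hr
    rcases List.mem_or_eq_of_mem_set hr with hm | hm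
    · exact h2 r hm
    · subst hm
      rw [List.getD_eq_getElem _ _ hx]
      simpa using h2 _ (List.getElem_mem hx)
  · rw [List.set_eq_of_length_le (by omega)]
    exact h2

lemma row_count_set {r : List Bool} {b : Nat} (hb : b < r.length) (hf : r[b] = false) :
    (r.set b true).count false + 1 = r.count false := by
  induction r generalizing b with
  | nil => simp at hb
  | cons a t ih =>
    cases b with
    | zero => simp_all
    | succ b =>
      simp only [List.set_cons_succ, List.count_cons]
      have := ih (by simpa using hb) (by simpa using hf)
      omega

lemma unvis_set_row : ∀ (v : List (List Bool)) (a : Nat) (r : List Bool), a < v.length →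
    unvis (v.set a r) + (v.getD a []).count false = unvis v + r.count false := by
  intro v
  induction v with
  | nil => intro a r h; simp at h
  | cons hd t ih =>
    intro a r h
    cases a with
    | zero => simp [unvis, List.count]; omega
    | succ a =>
      simp only [unvis, List.set_cons_succ, List.map_cons, List.sum_cons,
        List.getD_cons_succ] at *
      have := ih a r (by simpa using h)
      omega

lemma unvis_vset {m n : Nat} {v : List (List Bool)} {x y : Int} (h : ShapeOk m n v)
    (hx0 : 0 ≤ x) (hxm : x < (m : Int)) (hy0 : 0 ≤ y) (hyn : y < (n : Int))
    (hf : vget v x y = false) :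
    unvis (vset v x y) + 1 = unvis v := by
  obtain ⟨h1, h2⟩ := h
  have hx : x.toNat < v.length := by omega
  have hrow : v.getD x.toNat [] = v[x.toNat] := List.getD_eq_getElem _ _ hx
  have hlen : (v[x.toNat]).length = n := h2 _ (List.getElem_mem hx)
  have hy : y.toNat < (v.getD x.toNat []).length := by rw [hrow, hlen]; omega
  have hcell : (v.getD x.toNat [])[y.toNat] = false := by
    have := hf
    unfold vget at this
    rwa [List.getD_eq_getElem _ _ hy] at this
  have hset := unvis_set_row v x.toNat ((v.getD x.toNat []).set y.toNat true) hx
  have hcnt := row_count_set hy hcell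
  unfold vset
  omega

lemma dfsA_inv (g : List (List Int)) (m n : Nat) :
    ∀ (fuel : Nat) (vis : List (List Bool)) (x y : Int), ShapeOk m n vis →
    ShapeOk m n (dfsA g (m : Int) (n : Int) fuel vis x y).2 ∧
    unvis (dfsA g (m : Int) (n : Int) fuel vis x y).2 ≤ unvis vis ∧
    (dfsA g (m : Int) (n : Int) fuel vis x y).1
      = (unvis vis : Int) - (unvis (dfsA g (m : Int) (n : Int) fuel vis x y).2 : Int) := by
  intro fuel
  induction fuel with
  | zero => intro vis x y h; exact ⟨h, le_refl _, by simp [dfsA]⟩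
  | succ fuel ih =>
    intro vis x y h
    by_cases hg : x < 0 ∨ (m : Int) ≤ x ∨ y < 0 ∨ (n : Int) ≤ y ∨ gcell g x y = 0 ∨ vget vis x y
    · simp only [dfsA, if_pos hg]
      exact ⟨h, le_refl _, by omega⟩
    · push_neg at hg
      obtain ⟨hx0, hxm, hy0, hyn, _, hvf⟩ := hg
      simp only [dfsA, if_neg (by push_neg; exact ⟨hx0, hxm, hy0, hyn, by assumption,
        by simpa using hvf⟩ : ¬ (x < 0 ∨ (m : Int) ≤ x ∨ y < 0 ∨ (n : Int) ≤ y ∨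
          gcell g x y = 0 ∨ vget vis x y = true))]
      have hsh1 : ShapeOk m n (vset vis x y) := vset_shape ⟨h.1, h.2⟩ x y
      have hu1 : unvis (vset vis x y) + 1 = unvis vis :=
        unvis_vset h hx0 hxm hy0 hyn (by simpa using hvf)
      obtain ⟨s1, l1, c1⟩ := ih (vset vis x y) (x+1) y hsh1
      obtain ⟨s2, l2, c2⟩ := ih (dfsA g m n fuel (vset vis x y) (x+1) y).2 (x-1) y s1
      obtain ⟨s3, l3, c3⟩ := ih (dfsA g m n fuel (dfsA g m n fuel (vset vis x y) (x+1) y).2 (x-1) y).2 x (y+1) s2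
      obtain ⟨s4, l4, c4⟩ := ih (dfsA g m n fuel (dfsA g m n fuel (dfsA g m n fuel (vset vis x y) (x+1) y).2 (x-1) y).2 x (y+1)).2 x (y-1) s3
      exact ⟨s4, by omega, by omega⟩

-- the stack loop of B simulates the recursive dfs of A, consuming exactly 1 + 4·(marked cells) steps
lemma sim (g : List (List Int)) (m n : Nat) :
    ∀ (u : Nat) (vis : List (List Bool)), unvis vis ≤ u → ShapeOk m n vis →
    ∀ (x y : Int) (cnt : Int) (rest : List (Int × Int)) (fA fB : Nat), unvis vis < fA →
    loopB g (m : Int) (n : Int)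
        (fB + 1 + 4*(unvis vis - unvis (dfsA g (m : Int) (n : Int) fA vis x y).2)) cnt vis
        ((x, y) :: rest)
      = loopB g (m : Int) (n : Int) fB (cnt + (dfsA g (m : Int) (n : Int) fA vis x y).1)
          (dfsA g (m : Int) (n : Int) fA vis x y).2 rest := by
  intro u
  induction u with
  | zero =>
    intro vis hu hsh x y cnt rest fA fB hfA
    by_cases hg : x < 0 ∨ (m : Int) ≤ x ∨ y < 0 ∨ (n : Int) ≤ y ∨ gcell g x y = 0 ∨ vget vis x y = true
    ·
      cases fA with
      | zero => omega
      | succ fA' =>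
        have hd1 : (dfsA g (m : Int) (n : Int) (fA'+1) vis x y).1 = 0 := by
          simp only [dfsA, if_pos hg]
        have hd2 : (dfsA g (m : Int) (n : Int) (fA'+1) vis x y).2 = vis := by
          simp only [dfsA, if_pos hg]
        rw [hd1, hd2]
        rw [show fB + 1 + 4*(unvis vis - unvis vis) = fB + 1 from by omega]
        simp only [loopB]
        rw [if_pos hg]
        norm_num

    · push_neg at hg
      obtain ⟨hx0, hxm, hy0, hyn, hc, hvf⟩ := hg
      have := unvis_vset hsh hx0 hxm hy0 hyn (by simpa using hvf)
      omega
  | succ u ih =>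
    intro vis hu hsh x y cnt rest fA fB hfA
    by_cases hg : x < 0 ∨ (m : Int) ≤ x ∨ y < 0 ∨ (n : Int) ≤ y ∨ gcell g x y = 0 ∨ vget vis x y = true
    ·
      cases fA with
      | zero => omega
      | succ fA' =>
        have hd1 : (dfsA g (m : Int) (n : Int) (fA'+1) vis x y).1 = 0 := by
          simp only [dfsA, if_pos hg]
        have hd2 : (dfsA g (m : Int) (n : Int) (fA'+1) vis x y).2 = vis := by
          simp only [dfsA, if_pos hg]
        rw [hd1, hd2]
        rw [show fB + 1 + 4*(unvis vis - unvis vis) = fB + 1 from by omega]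
        simp only [loopB]
        rw [if_pos hg]
        norm_num

    · cases fA with
      | zero => omega
      | succ fA' =>
        have hgneg := hg
        push_neg at hg
        obtain ⟨hx0, hxm, hy0, hyn, hc, hvf⟩ := hg
        have hsh1 : ShapeOk m n (vset vis x y) := vset_shape hsh x y
        have hu1 : unvis (vset vis x y) + 1 = unvis vis :=
          unvis_vset hsh hx0 hxm hy0 hyn (by simpa using hvf)
        obtain ⟨s1, l1, c1⟩ := dfsA_inv g m n fA' (vset vis x y) (x+1) y hsh1
        obtain ⟨s2, l2, c2⟩ := dfsA_inv g m n fA' (dfsA g (m : Int) (n : Int) fA' (vset vis x y) (x+1) y).2 (x-1) y s1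
        obtain ⟨s3, l3, c3⟩ := dfsA_inv g m n fA' (dfsA g (m : Int) (n : Int) fA' (dfsA g (m : Int) (n : Int) fA' (vset vis x y) (x+1) y).2 (x-1) y).2 x (y+1) s2
        obtain ⟨s4, l4, c4⟩ := dfsA_inv g m n fA' (dfsA g (m : Int) (n : Int) fA' (dfsA g (m : Int) (n : Int) fA' (dfsA g (m : Int) (n : Int) fA' (vset vis x y) (x+1) y).2 (x-1) y).2 x (y+1)).2 x (y-1) s3
        have hunf1 : (dfsA g (m : Int) (n : Int) (fA'+1) vis x y).1
            = 1 + (dfsA g (m : Int) (n : Int) fA' (vset vis x y) (x+1) y).1 + (dfsA g (m : Int) (n : Int) fA' (dfsA g (m : Int) (n : Int) fA' (vset vis x y) (x+1) y).2 (x-1) y).1 + (dfsA g (m : Int) (n : Int) fA' (dfsA g (m : Int) (n : Int) fA' (dfsA g (m : Int) (n : Int) fA' (vset vis x y) (x+1) y).2 (x-1) y).2 x (y+1)).1 + (dfsA g (m : Int) (n : Int) fA' (dfsA g (m : Int) (n : Int) fA' (dfsA g (m : Int) (n : Int) fA' (dfsA g (m : Int) (n : Int) fA' (vset vis x y) (x+1)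 y).2 (x-1) y).2 x (y+1)).2 x (y-1)).1 := by
          simp only [dfsA, if_neg hgneg]
        have hunf2 : (dfsA g (m : Int) (n : Int) (fA'+1) vis x y).2 = (dfsA g (m : Int) (n : Int) fA' (dfsA g (m : Int) (n : Int) fA' (dfsA g (m : Int) (n : Int) fA' (dfsA g (m : Int) (n : Int) fA' (vset vis x y) (x+1) y).2 (x-1) y).2 x (y+1)).2 x (y-1)).2 := by
          simp only [dfsA, if_neg hgneg]
        rw [hunf1, hunf2]
        have e1 : fB + 1 + 4*(unvis vis - unvis (dfsA g (m : Int) (n : Int) fA' (dfsA g (m : Int) (n : Int) fA' (dfsA g (m : Int) (n : Int) fA' (dfsA g (m : Int) (n : Int) fA' (vset vis x y) (x+1) y).2 (x-1) y).2 x (y+1)).2 x (y-1)).2)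
            = ((((fB + 1 + 4*(unvis (dfsA g (m : Int) (n : Int) fA' (dfsA g (m : Int) (n : Int) fA' (dfsA g (m : Int) (n : Int) fA' (vset vis x y) (x+1) y).2 (x-1) y).2 x (y+1)).2 - unvis (dfsA g (m : Int) (n : Int) fA' (dfsA g (m : Int) (n : Int) fA' (dfsA g (m : Int) (n : Int) fA' (dfsA g (m : Int) (n : Int) fA' (vset vis x y) (x+1) y).2 (x-1) y).2 x (y+1)).2 x (y-1)).2)) + 1 + 4*(unvis (dfsA g (m : Int) (n : Int) fA' (dfsA g (m : Int) (n : Int) fA' (vset vis x y) (x+1) y).2 (x-1) y).2 - unvis (dfsA g (m : Int) (n : Int) fA' (dfsA g (m : Int) (n : Int) fA' (dfsA g (m : Int) (n : Int) fA' (vset vis x y) (x+1) y).2 (x-1) y).2 x (y+1)).2))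
                + 1 + 4*(unvis (dfsA g (m : Int) (n : Int) fA' (vset vis x y) (x+1) y).2 - unvis (dfsA g (m : Int) (n : Int) fA' (dfsA g (m : Int) (n : Int) fA' (vset vis x y) (x+1) y).2 (x-1) y).2)) + 1 + 4*(unvis (vset vis x y) - unvis (dfsA g (m : Int) (n : Int) fA' (vset vis x y) (x+1) y).2)) + 1 := by
          omega
        rw [e1]
        simp only [loopB]
        rw [if_neg hgneg]
        refine (ih (vset vis x y) (by omega) hsh1 (x+1) y (cnt+1) ((x-1, y) :: (x, y+1) :: (x, y-1) :: rest) fA' (((fB + 1 + 4*(unvis (dfsA g (m : Int) (n : Int) fA' (dfsA g (m : Int) (n : Int) fA' (dfsA g (m : Int) (n : Int) fA' (vset vis x y) (x+1) y).2 (x-1) y).2 x (y+1)).2 - unvis (dfsA g (m : Int) (n : Int) fA' (dfsA g (m : Int) (n : Int) fA' (dfsA g (m : Int) (n : Int) fA' (dfsA g (m : Int) (n : Int) fA' (vset vis x y) (x+1) y).2 (x-1) y).2 x (y+1)).2 x (y-1)).2)) + 1 + 4*(unvis (dfsA g (m : Int) (n : Int) fA' (dfsA g (m : Int) (n : Int)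 fA' (vset vis x y) (x+1) y).2 (x-1) y).2 - unvis (dfsA g (m : Int) (n : Int) fA' (dfsA g (m : Int) (n : Int) fA' (dfsA g (m : Int) (n : Int) fA' (vset vis x y) (x+1) y).2 (x-1) y).2 x (y+1)).2)) + 1 + 4*(unvis (dfsA g (m : Int) (n : Int) fA' (vset vis x y) (x+1) y).2 - unvis (dfsA g (m : Int) (n : Int) fA' (dfsA g (m : Int) (n : Int) fA' (vset vis x y) (x+1) y).2 (x-1) y).2)) (by omega)).trans ?_
        refine (ih (dfsA g (m : Int) (n : Int) fA' (vset vis x y) (x+1) y).2 (by omega) s1 (x-1) y (cnt + 1 + (dfsA g (m : Int) (n : Int) fA' (vset vis x y) (x+1) y).1) ((x, y+1) :: (x, y-1) :: rest) fA' ((fB + 1 + 4*(unvis (dfsA g (m : Int) (n : Int) fA' (dfsA g (m : Int) (n : Int) fA' (dfsA g (m : Int) (n : Int) fA' (vset vis x y) (x+1) y).2 (x-1) y).2 x (y+1)).2 - unvis (dfsA g (m : Int) (n : Int) fA' (dfsA g (m : Int) (n : Int) fA' (dfsA g (m : Int) (n : Int) fA' (dfsA g (m : Int) (n : Int) fA'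 (vset vis x y) (x+1) y).2 (x-1) y).2 x (y+1)).2 x (y-1)).2)) + 1 + 4*(unvis (dfsA g (m : Int) (n : Int) fA' (dfsA g (m : Int) (n : Int) fA' (vset vis x y) (x+1) y).2 (x-1) y).2 - unvis (dfsA g (m : Int) (n : Int) fA' (dfsA g (m : Int) (n : Int) fA' (dfsA g (m : Int) (n : Int) fA' (vset vis x y) (x+1) y).2 (x-1) y).2 x (y+1)).2)) (by omega)).trans ?_
        refine (ih (dfsA g (m : Int) (n : Int) fA' (dfsA g (m : Int) (n : Int) fA' (vset vis x y) (x+1) y).2 (x-1) y).2 (by omega) s2 x (y+1) (cnt + 1 + (dfsA g (m : Int) (n : Int) fA' (vset vis x y) (x+1) y).1 + (dfsA g (m : Int) (n : Int) fA' (dfsA g (m : Int) (n : Int) fA' (vset vis x y) (x+1) y).2 (x-1) y).1) ((x, y-1) :: rest) fA' (fB + 1 + 4*(unvis (dfsA g (m : Int) (n : Int) fA' (dfsA g (m : Int) (n : Int) fA' (dfsA g (m : Int) (n : Int) fA' (vset vis x y) (x+1) y).2 (x-1) y).2 x (y+1)).2 - unvis (dfsA g (m : Int) (n : Int) fA' (dfsA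 g (m : Int) (n : Int) fA' (dfsA g (m : Int) (n : Int) fA' (dfsA g (m : Int) (n : Int) fA' (vset vis x y) (x+1) y).2 (x-1) y).2 x (y+1)).2 x (y-1)).2)) (by omega)).trans ?_
        refine (ih (dfsA g (m : Int) (n : Int) fA' (dfsA g (m : Int) (n : Int) fA' (dfsA g (m : Int) (n : Int) fA' (vset vis x y) (x+1) y).2 (x-1) y).2 x (y+1)).2 (by omega) s3 x (y-1) (cnt + 1 + (dfsA g (m : Int) (n : Int) fA' (vset vis x y) (x+1) y).1 + (dfsA g (m : Int) (n : Int) fA' (dfsA g (m : Int) (n : Int) fA' (vset vis x y) (x+1) y).2 (x-1) y).1 + (dfsA g (m : Int) (n : Int) fA' (dfsA g (m : Int) (n : Int) fA' (dfsA g (m : Int) (n : Int) fA' (vset vis x y) (x+1) y).2 (x-1) y).2 x (y+1)).1) rest fA' fB (by omega)).trans ?_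
        congr 1
        ring


lemma scan_first (g : List (List Int)) (m n : Nat) (land : Int) (vis : List (List Bool)) :
    ∀ ps : List (Nat × Nat), scanA g m n land vis ps
      = (match firstLand g ps with
         | none => true
         | some (i, j) =>
           decide ((dfsA g (m : Int) (n : Int) (m*n+1) vis (i : Int) (j : Int)).1 ≠ land)) := by
  intro ps
  induction ps with
  | nil => simp [scanA, firstLand]
  | cons p rest ih =>
    obtain ⟨i, j⟩ := p
    by_cases hc : gcell g (i : Int) (j : Int) = 1
    · simp [scanA, firstLand, hc]
    · simp only [scanA, firstLand, if_neg hc]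
      exact ih

lemma shape_replicate (m n : Nat) : ShapeOk m n (List.replicate m (List.replicate n false)) := by
  refine ⟨by simp, ?_⟩
  intro r hr
  rw [List.eq_of_mem_replicate hr]
  simp

lemma unvis_replicate (m n : Nat) : unvis (List.replicate m (List.replicate n false)) = m * n := by
  unfold unvis
  rw [List.map_replicate]
  simp [List.sum_replicate]

lemma sum_flat (grid : List (List Int)) :
    (grid.flatMap (fun row => row)).sum = (grid.map (fun row => row.sum)).sum := by
  induction grid with
  | nil => simp
  | cons r t ih => simp [List.flatMap_cons]

-- ===== VERDICT (by name: the statement is the Claim_ definition above) =====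
theorem isDisconnected_spec : Claim_equal_isDisconnected := by
  unfold Claim_equal_isDisconnected
  intro grid _ _
  unfold Spec_isDisconnected isDisconnected isDisconnected_alt
  simp only []
  rw [scan_first, sum_flat]
  cases hfl : firstLand grid (pairs grid.length (grid.headD []).length) with
  | none => rfl
  | some p =>
    obtain ⟨i, j⟩ := p
    simp only []
    congr 1
    -- the loop count equals the dfs count
    set m := grid.length with hm
    set n := (grid.headD []).length with hn
    set vis0 := List.replicate m (List.replicate n false) with hvis0
    have hsh : ShapeOk m n vis0 := shape_replicate m n
    have hu0 : unvis vis0 = m * n := unvis_replicate m n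
    obtain ⟨sD, lD, cD⟩ := dfsA_inv grid m n (m*n+1) vis0 (i : Int) (j : Int) hsh
    have e : 4*(m*n)+1
        = (4*(m*n) - 4*(unvis vis0 - unvis (dfsA grid (m : Int) (n : Int) (m*n+1) vis0 (i : Int) (j : Int)).2))
          + 1 + 4*(unvis vis0 - unvis (dfsA grid (m : Int) (n : Int) (m*n+1) vis0 (i : Int) (j : Int)).2) := by
      omega
    rw [e, sim grid m n (unvis vis0) vis0 (le_refl _) hsh (i : Int) (j : Int) 0 [] (m*n+1) _ (by omega)]
    simp [loopB]
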